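-- pv_equiv track=rewrite | github.com/Mengzeovo/Project-Architecture-Visualization | src/archviz/features/classifier.py | _pick_explicit_feature_segment
-- ===== SOURCE A (Python) =====
-- _SKIP_SEGMENTS = {
--     "src",
--     "lib",
--     "app",
--     "apps",
--     "services",
--     "service",
--     "modules",
--     "module",
--     "features",
--     "feature",
--     "internal",
--     "pkg",
--     "cmd",
--     "commands",
--     "server",
--     "client",
--     "api",
--     "core",
--     "domain",
--     "infra",
--     "infrastructure",
--     "common",
--     "shared",
--     "utils",
--     "tests",
--     "test",
--     "__pycache__",
-- }
--
-- def _pick_explicit_feature_segment(parts: list[str]) -> str | None: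
--     normalized = [segment.strip().lower() for segment in parts[:-1]]
--     candidate: str | None = None
--     for segment in normalized:
--         if not segment or segment in _SKIP_SEGMENTS:
--             continue
--         if segment.startswith("_") or segment.startswith("."):
--             continue
--         if segment.endswith("s") and len(segment) > 4 and segment[:-1] not in _SKIP_SEGMENTS:
--             candidate = segment[:-1]
--         else:
--             candidate = segment
--     return candidate
-- ===== SOURCE B (Python) =====
-- _SKIP_SEGMENTS = {
--     "src", "lib", "app", "apps", "services", "service", "modules", "module",
--     "features", "feature", "internal", "pkg", "cmd", "commands", "server",
--     "client", "api", "core", "domain", "infra", "infrastructure", "common",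
--     "shared", "utils", "tests", "test", "__pycache__",
-- }
--
--
-- def _pick_explicit_feature_segment(parts: list[str]) -> str | None:
--     # Scan backwards and return on the first qualifying segment: no running state.
--     for raw in reversed(parts[:-1]):
--         segment = raw.strip().lower()
--         if not segment or segment in _SKIP_SEGMENTS:
--             continue
--         if segment.startswith("_") or segment.startswith("."):
--             continue
--         if segment.endswith("s") and len(segment) > 4 and segment[:-1] not in _SKIP_SEGMENTS:
--             return segment[:-1]
--         return segment
--     return None
-- ===== Notes on version B (the rewrite author's own statement) =====
-- stated objective: simpler
-- what changed: Replaces the forward pass that normalizes every segment up front and keeps overwriting a candidate variable with a stateless backwards scan that normalizes lazily and returns on the first qualifying segment.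
import Mathlib
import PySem

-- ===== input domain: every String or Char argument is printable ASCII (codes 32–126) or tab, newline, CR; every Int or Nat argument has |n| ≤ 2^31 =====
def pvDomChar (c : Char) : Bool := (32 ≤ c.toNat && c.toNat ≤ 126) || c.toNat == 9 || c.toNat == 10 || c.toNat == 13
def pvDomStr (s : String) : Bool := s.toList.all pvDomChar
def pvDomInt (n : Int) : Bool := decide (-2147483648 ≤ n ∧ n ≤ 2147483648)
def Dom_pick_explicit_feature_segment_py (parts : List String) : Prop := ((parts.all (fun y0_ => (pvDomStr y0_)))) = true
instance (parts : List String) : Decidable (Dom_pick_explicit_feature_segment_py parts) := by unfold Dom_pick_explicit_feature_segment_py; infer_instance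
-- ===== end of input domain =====

-- B replaces A's forward pass with an overwritten candidate by a stateless backwards scan
-- that returns on the first qualifying segment (same per-segment checks, early exit).

def pvSkipSegments : List String :=
  ["src", "lib", "app", "apps", "services", "service", "modules", "module",
   "features", "feature", "internal", "pkg", "cmd", "commands", "server",
   "client", "api", "core", "domain", "infra", "infrastructure", "common",
   "shared", "utils", "tests", "test", "__pycache__"]

-- ===== PORT A =====
def pick_explicit_feature_segment_py (parts : List String) : Option String :=
  let normalized := (PySem.List.slice parts none (some (-1))).map
      (fun segment => PySem.Str.lower (PySem.Str.strip segment))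
  normalized.foldl
    (fun candidate segment =>
      if segment == "" || pvSkipSegments.contains segment then candidate
      else if PySem.Str.startswith segment "_" || PySem.Str.startswith segment "." then candidate
      else if PySem.Str.endswith segment "s" && decide (4 < PySem.Str.len segment)
              && !pvSkipSegments.contains (PySem.Str.slice segment none (some (-1))) then
        some (PySem.Str.slice segment none (some (-1)))
      else some segment)
    none

-- ===== PORT B =====
def pvAltGo : List String → Option String
  | [] => none
  | raw :: rest =>
    let segment := PySem.Str.lower (PySem.Str.strip raw)
    if segment == "" || pvSkipSegments.contains segment then pvAltGo rest
    else if PySem.Str.startswith segment "_" || PySem.Str.startswith segment "." then pvAltGo rest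
    else if PySem.Str.endswith segment "s" && decide (4 < PySem.Str.len segment)
            && !pvSkipSegments.contains (PySem.Str.slice segment none (some (-1))) then
      some (PySem.Str.slice segment none (some (-1)))
    else some segment

def pick_explicit_feature_segment_py_alt (parts : List String) : Option String :=
  pvAltGo (PySem.List.slice parts none (some (-1))).reverse

-- ===== PRECONDITION & SPEC =====
def Spec_pick_explicit_feature_segment_py (parts : List String) (out : Option String) : Prop := out = pick_explicit_feature_segment_py_alt parts
instance (parts : List String) (out : Option String) : Decidable (Spec_pick_explicit_feature_segment_py parts out) := by unfold Spec_pick_explicit_feature_segment_py; infer_instance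

-- ===== CLAIM (what is proved, stated in full; the proofs are below) =====
def Claim_equal_pick_explicit_feature_segment_py : Prop := ∀ (parts : List String), Dom_pick_explicit_feature_segment_py parts → Spec_pick_explicit_feature_segment_py parts (pick_explicit_feature_segment_py parts)

-- ===== LEMMAS AND PROOFS =====

-- a segment qualifies iff it is not skipped/empty and not underscore/dot-prefixed
def pvQual (segment : String) : Bool :=
  !(segment == "" || pvSkipSegments.contains segment)
  && !(PySem.Str.startswith segment "_" || PySem.Str.startswith segment ".")

-- the value a qualifying segment contributes
def pvTrans (segment : String) : String :=
  if PySem.Str.endswith segment "s" && decide (4 < PySem.Str.len segment)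
      && !pvSkipSegments.contains (PySem.Str.slice segment none (some (-1))) then
    PySem.Str.slice segment none (some (-1))
  else segment

lemma pvQual_false_left (seg : String)
    (h : (seg == "" || pvSkipSegments.contains seg) = true) : pvQual seg = false := by
  unfold pvQual; rw [h]; rfl

lemma pvQual_false_right (seg : String)
    (h : (PySem.Str.startswith seg "_" || PySem.Str.startswith seg ".") = true) :
    pvQual seg = false := by
  unfold pvQual; rw [h]; exact Bool.and_false _

lemma pvQual_true (seg : String)
    (h1 : (seg == "" || pvSkipSegments.contains seg) = false)
    (h2 : (PySem.Str.startswith seg "_" || PySem.Str.startswith seg ".") = false) :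
    pvQual seg = true := by
  unfold pvQual; rw [h1, h2]; rfl

lemma bool_eq_false_of_ne_true {b : Bool} (h : ¬ b = true) : b = false := by
  cases b
  · rfl
  · exact absurd rfl h

lemma pvFoldl_eq_find (l : List String) (init : Option String) :
    l.foldl
      (fun candidate segment =>
        if segment == "" || pvSkipSegments.contains segment then candidate
        else if PySem.Str.startswith segment "_" || PySem.Str.startswith segment "." then candidate
        else if PySem.Str.endswith segment "s" && decide (4 < PySem.Str.len segment)
                && !pvSkipSegments.contains (PySem.Str.slice segment none (some (-1))) then
          some (PySem.Str.slice segment none (some (-1)))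
        else some segment)
      init
    = match l.reverse.find? pvQual with
      | some s => some (pvTrans s)
      | none => init := by
  induction l generalizing init with
  | nil => simp
  | cons hd tl ih =>
    simp only [List.foldl_cons, List.reverse_cons, List.find?_append, ih]
    cases h : tl.reverse.find? pvQual with
    | some s => rfl
    | none =>
      simp only [Option.none_or]
      by_cases h1 : (hd == "" || pvSkipSegments.contains hd) = true
      · rw [List.find?_cons_of_neg (by rw [pvQual_false_left hd h1]; exact Bool.false_ne_true),
          List.find?_nil, if_pos h1]
      · have h1' := bool_eq_false_of_ne_true h1
        by_cases h2 : (PySem.Str.startswith hd "_" || PySem.Str.startswith hd ".") = true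
        · rw [List.find?_cons_of_neg (by rw [pvQual_false_right hd h2]; exact Bool.false_ne_true),
            List.find?_nil, if_neg h1, if_pos h2]
        · have h2' := bool_eq_false_of_ne_true h2
          rw [List.find?_cons_of_pos (pvQual_true hd h1' h2'), if_neg h1, if_neg h2]
          simp only [pvTrans]
          rw [apply_ite some]

lemma pvAltGo_eq_find (l : List String) :
    pvAltGo l
    = match l.find? (fun raw => pvQual (PySem.Str.lower (PySem.Str.strip raw))) with
      | some raw => some (pvTrans (PySem.Str.lower (PySem.Str.strip raw)))
      | none => none := by
  induction l with
  | nil => rfl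
  | cons raw rest ih =>
    simp only [pvAltGo]
    by_cases h1 : (PySem.Str.lower (PySem.Str.strip raw) == ""
        || pvSkipSegments.contains (PySem.Str.lower (PySem.Str.strip raw))) = true
    · rw [if_pos h1, ih,
        List.find?_cons_of_neg (p := fun raw => pvQual (PySem.Str.lower (PySem.Str.strip raw)))
          (by simp only []; rw [pvQual_false_left _ h1]; exact Bool.false_ne_true)]
    · rw [if_neg h1]
      have h1' := bool_eq_false_of_ne_true h1
      by_cases h2 : (PySem.Str.startswith (PySem.Str.lower (PySem.Str.strip raw)) "_"
          || PySem.Str.startswith (PySem.Str.lower (PySem.Str.strip raw)) ".") = true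
      · rw [if_pos h2, ih,
          List.find?_cons_of_neg (p := fun raw => pvQual (PySem.Str.lower (PySem.Str.strip raw)))
            (by simp only []; rw [pvQual_false_right _ h2]; exact Bool.false_ne_true)]
      · have h2' := bool_eq_false_of_ne_true h2
        rw [if_neg h2,
          List.find?_cons_of_pos (p := fun raw => pvQual (PySem.Str.lower (PySem.Str.strip raw)))
            (by simp only []; exact pvQual_true _ h1' h2')]
        simp only [pvTrans]
        rw [apply_ite some]

-- ===== VERDICT (by name: the statement is the Claim_ definition above) =====
theorem pick_explicit_feature_segment_py_spec : Claim_equal_pick_explicit_feature_segment_py := by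
  intro parts _
  show pick_explicit_feature_segment_py parts = pick_explicit_feature_segment_py_alt parts
  unfold pick_explicit_feature_segment_py pick_explicit_feature_segment_py_alt
  rw [pvFoldl_eq_find, pvAltGo_eq_find, ← List.map_reverse, List.find?_map]
  simp only [Function.comp_def]
  cases (PySem.List.slice parts none (some (-1))).reverse.find?
      (fun raw => pvQual (PySem.Str.lower (PySem.Str.strip raw))) <;> rfl
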